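-- pv_equiv track=rewrite | github.com/endphaze/Performance-Monitor-2 | TCP_Feature/tools/hashlittlebyte.py | hashlittle2
-- ===== SOURCE A (Python) =====
-- def rot(x, k):
--     return (((x << k) & 0xFFFFFFFF) | (x >> (32 - k)))
--
-- def mix(a, b, c):
--     a &= 0xFFFFFFFF; b &= 0xFFFFFFFF; c &= 0xFFFFFFFF
--     a = (a - c) & 0xFFFFFFFF; a ^= rot(c, 4);  c = (c + b) & 0xFFFFFFFF
--     b = (b - a) & 0xFFFFFFFF; b ^= rot(a, 6);  a = (a + c) & 0xFFFFFFFF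
--     c = (c - b) & 0xFFFFFFFF; c ^= rot(b, 8);  b = (b + a) & 0xFFFFFFFF
--     a = (a - c) & 0xFFFFFFFF; a ^= rot(c, 16); c = (c + b) & 0xFFFFFFFF
--     b = (b - a) & 0xFFFFFFFF; b ^= rot(a, 19); a = (a + c) & 0xFFFFFFFF
--     c = (c - b) & 0xFFFFFFFF; c ^= rot(b, 4);  b = (b + a) & 0xFFFFFFFF
--     return a, b, c
--
-- def final(a, b, c):
--     a &= 0xFFFFFFFF; b &= 0xFFFFFFFF; c &= 0xFFFFFFFF
--     c ^= b; c = (c - rot(b, 14)) & 0xFFFFFFFF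
--     a ^= c; a = (a - rot(c, 11)) & 0xFFFFFFFF
--     b ^= a; b = (b - rot(a, 25)) & 0xFFFFFFFF
--     c ^= b; c = (c - rot(b, 16)) & 0xFFFFFFFF
--     a ^= c; a = (a - rot(c, 4))  & 0xFFFFFFFF
--     b ^= a; b = (b - rot(a, 14)) & 0xFFFFFFFF
--     c ^= b; c = (c - rot(b, 24)) & 0xFFFFFFFF
--     return a, b, c
--
-- def hashlittle2(data, initval=0, initval2=0):
--     if isinstance(data, str):
--         data = data.encode('utf-8') # ป้องกัน error ถ้าเผลอส่ง string มา
--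
--     length = len(data)
--     lenpos = length
--     a = b = c = (0xdeadbeef + length + initval) & 0xFFFFFFFF
--     c = (c + initval2) & 0xFFFFFFFF
--
--     p = 0
--     # Process blocks of 12 bytes
--     while lenpos > 12:
--         a = (a + int.from_bytes(data[p:p+4], 'little')) & 0xFFFFFFFF
--         b = (b + int.from_bytes(data[p+4:p+8], 'little')) & 0xFFFFFFFF
--         c = (c + int.from_bytes(data[p+8:p+12], 'little')) & 0xFFFFFFFF
--         a, b, c = mix(a, b, c)
--         p += 12
--         lenpos -= 12
--
--     # Process remaining bytes (0-12 bytes)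
--     if lenpos > 0:
--         if lenpos >= 12: c = (c + (data[p+11] << 24)) & 0xFFFFFFFF
--         if lenpos >= 11: c = (c + (data[p+10] << 16)) & 0xFFFFFFFF
--         if lenpos >= 10: c = (c + (data[p+9] << 8)) & 0xFFFFFFFF
--         if lenpos >= 9:  c = (c + data[p+8]) & 0xFFFFFFFF
--
--         if lenpos >= 8:  b = (b + (data[p+7] << 24)) & 0xFFFFFFFF
--         if lenpos >= 7:  b = (b + (data[p+6] << 16)) & 0xFFFFFFFF
--         if lenpos >= 6:  b = (b + (data[p+5] << 8)) & 0xFFFFFFFF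
--         if lenpos >= 5:  b = (b + data[p+4]) & 0xFFFFFFFF
--
--         if lenpos >= 4:  a = (a + (data[p+3] << 24)) & 0xFFFFFFFF
--         if lenpos >= 3:  a = (a + (data[p+2] << 16)) & 0xFFFFFFFF
--         if lenpos >= 2:  a = (a + (data[p+1] << 8)) & 0xFFFFFFFF
--         if lenpos >= 1:  a = (a + data[p+0]) & 0xFFFFFFFF
--
--         a, b, c = final(a, b, c)
--
--     return c, b
-- ===== SOURCE B (Python) =====
-- M = 0xFFFFFFFF
--
-- def rot(x, k):
--     return (((x << k) & M) | (x >> (32 - k)))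
--
-- def mix(a, b, c):
--     a &= M; b &= M; c &= M
--     a = (a - c) & M; a ^= rot(c, 4);  c = (c + b) & M
--     b = (b - a) & M; b ^= rot(a, 6);  a = (a + c) & M
--     c = (c - b) & M; c ^= rot(b, 8);  b = (b + a) & M
--     a = (a - c) & M; a ^= rot(c, 16); c = (c + b) & M
--     b = (b - a) & M; b ^= rot(a, 19); a = (a + c) & M
--     c = (c - b) & M; c ^= rot(b, 4);  b = (b + a) & M
--     return a, b, c
--
-- def final(a, b, c):
--     a &= M; b &= M; c &= M
--     c ^= b; c = (c - rot(b, 14)) & M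
--     a ^= c; a = (a - rot(c, 11)) & M
--     b ^= a; b = (b - rot(a, 25)) & M
--     c ^= b; c = (c - rot(b, 16)) & M
--     a ^= c; a = (a - rot(c, 4))  & M
--     b ^= a; b = (b - rot(a, 14)) & M
--     c ^= b; c = (c - rot(b, 24)) & M
--     return a, b, c
--
-- def hashlittle2(data, initval=0, initval2=0):
--     if isinstance(data, str):
--         data = data.encode('utf-8')
--     n = len(data)
--     a = b = c = (0xdeadbeef + n + initval) & M
--     c = (c + initval2) & M
--     if n == 0:
--         return c, b
--     # Stage 1: pad the whole message to a multiple of 12 bytes and decode it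
--     # once into a table of little-endian 32-bit words, grouped in triples.
--     blocks = (n - 1) // 12 + 1
--     buf = data + b'\x00' * (blocks * 12 - n)
--     words = [int.from_bytes(buf[i:i + 4], 'little') for i in range(0, len(buf), 4)]
--     triples = [(words[i], words[i + 1], words[i + 2]) for i in range(0, len(words), 3)]
--     # Stage 2: one uniform fold over the triples: mix on every triple but the
--     # last, final on the last.
--     for x, y, z in triples[:-1]:
--         a = (a + x) & M; b = (b + y) & M; c = (c + z) & M
--         a, b, c = mix(a, b, c)
--     x, y, z = triples[-1]
--     a = (a + x) & M; b = (b + y) & M; c = (c + z) & M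
--     a, b, c = final(a, b, c)
--     return c, b
-- ===== Notes on version B (the rewrite author's own statement) =====
-- stated objective: alternative
-- what changed: B restructures the hash as two stages: it pads the whole message to a multiple of 12 bytes, decodes it once into a table of little-endian 32-bit word triples, then runs one uniform fold over that table (mix on every triple, final on the last), eliminating A's byte-indexed while loop and its twelve conditional tail branches.
import Mathlib
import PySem

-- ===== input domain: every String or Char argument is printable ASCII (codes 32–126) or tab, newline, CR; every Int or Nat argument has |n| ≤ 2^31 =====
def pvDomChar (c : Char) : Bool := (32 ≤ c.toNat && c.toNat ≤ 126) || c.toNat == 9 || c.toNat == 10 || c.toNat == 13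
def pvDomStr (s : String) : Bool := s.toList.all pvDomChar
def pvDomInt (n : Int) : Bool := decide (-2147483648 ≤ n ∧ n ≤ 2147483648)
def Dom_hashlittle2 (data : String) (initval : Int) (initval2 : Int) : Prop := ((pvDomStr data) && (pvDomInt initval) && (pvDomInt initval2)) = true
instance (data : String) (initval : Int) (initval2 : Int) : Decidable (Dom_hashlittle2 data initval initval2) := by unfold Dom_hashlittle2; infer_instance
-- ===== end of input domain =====

-- B replaces A's byte-indexed loop-plus-conditional-tail with two stages: pad
-- the message to whole 12-byte blocks, decode once into a word-triple table,
-- then fold uniformly (mix on each triple, final on the last); alternative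
-- decomposition, same cost.

-- ===== PORT A =====
-- shared helpers: rot/mix/final are identical module helpers in both Pythons.
-- All state is kept masked in [0, 2^32); Python's `& 0xFFFFFFFF` on these
-- operands is `% 4294967296`, and Python's `(x - y) & 0xFFFFFFFF` with
-- 0 ≤ x,y < 2^32 is `(x + 4294967296 - y) % 4294967296` over Nat (exact).
def pvRot (x k : Nat) : Nat := ((x <<< k) % 4294967296) ||| (x >>> (32 - k))

def pvMix (a b c : Nat) : Nat × Nat × Nat :=
  let a := a % 4294967296; let b := b % 4294967296; let c := c % 4294967296
  let a := (a + 4294967296 - c) % 4294967296; let a := a ^^^ pvRot c 4;  let c := (c + b) % 4294967296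
  let b := (b + 4294967296 - a) % 4294967296; let b := b ^^^ pvRot a 6;  let a := (a + c) % 4294967296
  let c := (c + 4294967296 - b) % 4294967296; let c := c ^^^ pvRot b 8;  let b := (b + a) % 4294967296
  let a := (a + 4294967296 - c) % 4294967296; let a := a ^^^ pvRot c 16; let c := (c + b) % 4294967296
  let b := (b + 4294967296 - a) % 4294967296; let b := b ^^^ pvRot a 19; let a := (a + c) % 4294967296
  let c := (c + 4294967296 - b) % 4294967296; let c := c ^^^ pvRot b 4;  let b := (b + a) % 4294967296
  (a, b, c)

def pvFinal (a b c : Nat) : Nat × Nat × Nat :=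
  let a := a % 4294967296; let b := b % 4294967296; let c := c % 4294967296
  let c := c ^^^ b; let c := (c + 4294967296 - pvRot b 14) % 4294967296
  let a := a ^^^ c; let a := (a + 4294967296 - pvRot c 11) % 4294967296
  let b := b ^^^ a; let b := (b + 4294967296 - pvRot a 25) % 4294967296
  let c := c ^^^ b; let c := (c + 4294967296 - pvRot b 16) % 4294967296
  let a := a ^^^ c; let a := (a + 4294967296 - pvRot c 4) % 4294967296
  let b := b ^^^ a; let b := (b + 4294967296 - pvRot a 14) % 4294967296
  let c := c ^^^ b; let c := (c + 4294967296 - pvRot b 24) % 4294967296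
  (a, b, c)

-- `a,b,c = final(a,b,c); return c, b`
def pvFinish (a b c : Nat) : Nat × Nat :=
  let r := pvFinal a b c
  (r.2.2, r.2.1)

-- data.encode('utf-8'): exact on the ASCII domain (every Dom char is < 128)
def pvBytes (data : String) : List Nat := data.toList.map Char.toNat

-- int.from_bytes(<4-byte slice>, 'little'); getD default is never hit on a
-- full slice, and equals B's zero padding on a short one
def pvWord4 (l : List Nat) : Nat :=
  l.getD 0 0 + l.getD 1 0 * 256 + l.getD 2 0 * 65536 + l.getD 3 0 * 16777216

-- A's while loop: p advances by 12 = recursion on the remaining byte list;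
-- data[p+i] is rest.getD i 0 (every access is guarded in range, default unused)
def pvLoopA (rest : List Nat) (a b c : Nat) : Nat × Nat :=
  if h : rest.length > 12 then
    let a := (a + pvWord4 (rest.take 4)) % 4294967296
    let b := (b + pvWord4 ((rest.drop 4).take 4)) % 4294967296
    let c := (c + pvWord4 ((rest.drop 8).take 4)) % 4294967296
    let r := pvMix a b c
    pvLoopA (rest.drop 12) r.1 r.2.1 r.2.2
  else if rest.length > 0 then
    let len := rest.length
    let c := if len ≥ 12 then (c + (rest.getD 11 0 <<< 24)) % 4294967296 else c
    let c := if len ≥ 11 then (c + (rest.getD 10 0 <<< 16)) % 4294967296 else c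
    let c := if len ≥ 10 then (c + (rest.getD 9 0 <<< 8)) % 4294967296 else c
    let c := if len ≥ 9 then (c + rest.getD 8 0) % 4294967296 else c
    let b := if len ≥ 8 then (b + (rest.getD 7 0 <<< 24)) % 4294967296 else b
    let b := if len ≥ 7 then (b + (rest.getD 6 0 <<< 16)) % 4294967296 else b
    let b := if len ≥ 6 then (b + (rest.getD 5 0 <<< 8)) % 4294967296 else b
    let b := if len ≥ 5 then (b + rest.getD 4 0) % 4294967296 else b
    let a := if len ≥ 4 then (a + (rest.getD 3 0 <<< 24)) % 4294967296 else a
    let a := if len ≥ 3 then (a + (rest.getD 2 0 <<< 16)) % 4294967296 else a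
    let a := if len ≥ 2 then (a + (rest.getD 1 0 <<< 8)) % 4294967296 else a
    let a := if len ≥ 1 then (a + rest.getD 0 0) % 4294967296 else a
    pvFinish a b c
  else (c, b)
termination_by rest.length
decreasing_by simp [List.length_drop]; omega

def hashlittle2 (data : String) (initval : Int) (initval2 : Int) : Int × Int :=
  let bytes := pvBytes data
  let length := bytes.length
  -- Python & 0xFFFFFFFF on an int = floor-mod 2^32; Lean Int.emod with a
  -- positive divisor agrees, and its result is nonnegative, so toNat is exact
  let a := ((3735928559 + (length : Int) + initval) % 4294967296).toNat
  let c := (((a : Int) + initval2) % 4294967296).toNat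
  let r := pvLoopA bytes a a c
  ((r.1 : Int), (r.2 : Int))

-- ===== PORT B =====
-- B stage 1a: the word comprehension `[int.from_bytes(buf[i:i+4],'little')
-- for i in range(0,len(buf),4)]` = structural recursion 4 bytes at a time
def pvWords : List Nat → List Nat
  | [] => []
  | [x0] => [pvWord4 [x0]]
  | [x0, x1] => [pvWord4 [x0, x1]]
  | [x0, x1, x2] => [pvWord4 [x0, x1, x2]]
  | x0 :: x1 :: x2 :: x3 :: l => pvWord4 [x0, x1, x2, x3] :: pvWords l

-- B stage 1b: the triple comprehension groups the word table in threes
def pvTriples : List Nat → List (Nat × Nat × Nat)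
  | [] => []
  | [_] => []
  | [_, _] => []
  | x :: y :: z :: rest => (x, y, z) :: pvTriples rest

-- B stage 2: the fold over `triples` — `for x,y,z in triples[:-1]` is a foldl
-- of the absorb-and-mix step over dropLast, then the last triple (triples[-1])
-- is absorbed and finalised; [] is unreachable (pvGo is only called with n > 0)
def pvStep (s t : Nat × Nat × Nat) : Nat × Nat × Nat :=
  pvMix ((s.1 + t.1) % 4294967296) ((s.2.1 + t.2.1) % 4294967296) ((s.2.2 + t.2.2) % 4294967296)

def pvGo (ts : List (Nat × Nat × Nat)) (a b c : Nat) : Nat × Nat :=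
  match ts.getLast? with
  | none => (c, b)
  | some t =>
    let s := ts.dropLast.foldl pvStep (a, b, c)
    pvFinish ((s.1 + t.1) % 4294967296) ((s.2.1 + t.2.1) % 4294967296) ((s.2.2 + t.2.2) % 4294967296)

-- blocks*12 - n, the zero padding B appends
def pvPad (n : Nat) : Nat := ((n - 1) / 12 + 1) * 12 - n

def hashlittle2_alt (data : String) (initval : Int) (initval2 : Int) : Int × Int :=
  let bytes := pvBytes data
  let n := bytes.length
  let a := ((3735928559 + (n : Int) + initval) % 4294967296).toNat
  let c := (((a : Int) + initval2) % 4294967296).toNat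
  if n = 0 then ((c : Int), (a : Int))
  else
    let buf := bytes ++ List.replicate (pvPad n) 0
    let r := pvGo (pvTriples (pvWords buf)) a a c
    ((r.1 : Int), (r.2 : Int))

-- ===== PRECONDITION & SPEC =====
def Spec_hashlittle2 (data : String) (initval : Int) (initval2 : Int) (out : Int × Int) : Prop := out = hashlittle2_alt data initval initval2
instance (data : String) (initval : Int) (initval2 : Int) (out : Int × Int) : Decidable (Spec_hashlittle2 data initval initval2 out) := by unfold Spec_hashlittle2; infer_instance

-- ===== CLAIM (what is proved, stated in full; the proofs are below) =====
def Claim_equal_hashlittle2 : Prop := ∀ (data : String) (initval : Int) (initval2 : Int), Dom_hashlittle2 data initval initval2 → Spec_hashlittle2 data initval initval2 (hashlittle2 data initval initval2)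

-- ===== LEMMAS AND PROOFS =====
theorem pvFinish_mod_a (a b c : Nat) : pvFinish (a % 4294967296) b c = pvFinish a b c := by
  simp [pvFinish, pvFinal, Nat.mod_mod_of_dvd]

theorem pvFinish_mod_b (a b c : Nat) : pvFinish a (b % 4294967296) c = pvFinish a b c := by
  simp [pvFinish, pvFinal, Nat.mod_mod_of_dvd]

theorem pvFinish_mod_c (a b c : Nat) : pvFinish a b (c % 4294967296) = pvFinish a b c := by
  simp [pvFinish, pvFinal, Nat.mod_mod_of_dvd]

theorem pvFinish_congr {a a' b b' c c' : Nat}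
    (ha : a % 4294967296 = a' % 4294967296)
    (hb : b % 4294967296 = b' % 4294967296)
    (hc : c % 4294967296 = c' % 4294967296) :
    pvFinish a b c = pvFinish a' b' c' := by
  rw [← pvFinish_mod_a a, ← pvFinish_mod_b, ← pvFinish_mod_c, ha, hb, hc,
    pvFinish_mod_a, pvFinish_mod_b, pvFinish_mod_c]

theorem pvPad_add12 (n : Nat) (h : 1 ≤ n) : pvPad (n + 12) = pvPad n := by
  unfold pvPad
  have h1 : (n + 12 - 1) / 12 = (n - 1) / 12 + 1 := by omega
  rw [h1]
  omega

theorem pvWords_twelve (x0 x1 x2 x3 x4 x5 x6 x7 x8 x9 x10 x11 : Nat) (l : List Nat) :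
    pvWords (x0 :: x1 :: x2 :: x3 :: x4 :: x5 :: x6 :: x7 :: x8 :: x9 :: x10 :: x11 :: l) =
      pvWord4 [x0, x1, x2, x3] :: pvWord4 [x4, x5, x6, x7] :: pvWord4 [x8, x9, x10, x11] :: pvWords l := rfl

theorem pvTriples_cons3 (x y z : Nat) (ws : List Nat) :
    pvTriples (x :: y :: z :: ws) = (x, y, z) :: pvTriples ws := rfl

theorem pvGo_cons (t u : Nat × Nat × Nat) (ts : List (Nat × Nat × Nat)) (a b c : Nat) :
    pvGo (t :: u :: ts) a b c =
      pvGo (u :: ts) (pvStep (a, b, c) t).1 (pvStep (a, b, c) t).2.1 (pvStep (a, b, c) t).2.2 := by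
  unfold pvGo
  rw [List.getLast?_cons_cons, List.dropLast_cons₂, List.foldl_cons]
  simp only [Prod.mk.eta]
  rcases hgl : (u :: ts).getLast? with _ | y
  · simp at hgl
  · rfl

theorem pvLoopA_step (rest : List Nat) (a b c : Nat) (h : rest.length > 12) :
    pvLoopA rest a b c =
      (let a := (a + pvWord4 (rest.take 4)) % 4294967296
       let b := (b + pvWord4 ((rest.drop 4).take 4)) % 4294967296
       let c := (c + pvWord4 ((rest.drop 8).take 4)) % 4294967296
       let r := pvMix a b c
       pvLoopA (rest.drop 12) r.1 r.2.1 r.2.2) := by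
  rw [pvLoopA, dif_pos h]

theorem pvTriples_ne (t : List Nat) (hne : t ≠ []) :
    ∃ u ts, pvTriples (pvWords (t ++ List.replicate (pvPad t.length) 0)) = u :: ts := by
  by_cases h : t.length > 12
  · rcases t with _ | ⟨x0, t⟩
    · simp at h
    rcases t with _ | ⟨x1, t⟩
    · simp at h
    rcases t with _ | ⟨x2, t⟩
    · simp at h
    rcases t with _ | ⟨x3, t⟩
    · simp at h
    rcases t with _ | ⟨x4, t⟩
    · simp at h
    rcases t with _ | ⟨x5, t⟩
    · simp at h
    rcases t with _ | ⟨x6, t⟩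
    · simp at h
    rcases t with _ | ⟨x7, t⟩
    · simp at h
    rcases t with _ | ⟨x8, t⟩
    · simp at h
    rcases t with _ | ⟨x9, t⟩
    · simp at h
    rcases t with _ | ⟨x10, t⟩
    · simp at h
    rcases t with _ | ⟨x11, t⟩
    · simp at h
    have h1 : 1 ≤ t.length := by
      rcases t with _ | ⟨y, t⟩
      · simp at h
      · simp only [List.length_cons]; omega
    have hl : (x0 :: x1 :: x2 :: x3 :: x4 :: x5 :: x6 :: x7 :: x8 :: x9 :: x10 :: x11 :: t).length = t.length + 12 := by simp
    rw [hl, pvPad_add12 _ h1]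
    simp only [List.cons_append]
    rw [pvWords_twelve, pvTriples_cons3]
    exact ⟨_, _, rfl⟩
  · rcases t with _ | ⟨x0, t⟩
    · exact absurd rfl hne
    rcases t with _ | ⟨x1, t⟩
    · rw [show pvPad ([x0]).length = 11 from by simp [pvPad]]
      exact ⟨_, _, rfl⟩
    rcases t with _ | ⟨x2, t⟩
    · rw [show pvPad ([x0, x1]).length = 10 from by simp [pvPad]]
      exact ⟨_, _, rfl⟩
    rcases t with _ | ⟨x3, t⟩
    · rw [show pvPad ([x0, x1, x2]).length = 9 from by simp [pvPad]]
      exact ⟨_, _, rfl⟩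
    rcases t with _ | ⟨x4, t⟩
    · rw [show pvPad ([x0, x1, x2, x3]).length = 8 from by simp [pvPad]]
      exact ⟨_, _, rfl⟩
    rcases t with _ | ⟨x5, t⟩
    · rw [show pvPad ([x0, x1, x2, x3, x4]).length = 7 from by simp [pvPad]]
      exact ⟨_, _, rfl⟩
    rcases t with _ | ⟨x6, t⟩
    · rw [show pvPad ([x0, x1, x2, x3, x4, x5]).length = 6 from by simp [pvPad]]
      exact ⟨_, _, rfl⟩
    rcases t with _ | ⟨x7, t⟩
    · rw [show pvPad ([x0, x1, x2, x3, x4, x5, x6]).length = 5 from by simp [pvPad]]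
      exact ⟨_, _, rfl⟩
    rcases t with _ | ⟨x8, t⟩
    · rw [show pvPad ([x0, x1, x2, x3, x4, x5, x6, x7]).length = 4 from by simp [pvPad]]
      exact ⟨_, _, rfl⟩
    rcases t with _ | ⟨x9, t⟩
    · rw [show pvPad ([x0, x1, x2, x3, x4, x5, x6, x7, x8]).length = 3 from by simp [pvPad]]
      exact ⟨_, _, rfl⟩
    rcases t with _ | ⟨x10, t⟩
    · rw [show pvPad ([x0, x1, x2, x3, x4, x5, x6, x7, x8, x9]).length = 2 from by simp [pvPad]]
      exact ⟨_, _, rfl⟩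
    rcases t with _ | ⟨x11, t⟩
    · rw [show pvPad ([x0, x1, x2, x3, x4, x5, x6, x7, x8, x9, x10]).length = 1 from by simp [pvPad]]
      exact ⟨_, _, rfl⟩
    rcases t with _ | ⟨x12, t⟩
    · rw [show pvPad ([x0, x1, x2, x3, x4, x5, x6, x7, x8, x9, x10, x11]).length = 0 from by simp [pvPad]]
      exact ⟨_, _, rfl⟩
    · simp at h

theorem pvExists12 (l : List Nat) (h : l.length > 12) :
    ∃ x0 x1 x2 x3 x4 x5 x6 x7 x8 x9 x10 x11 t, l = x0 :: x1 :: x2 :: x3 :: x4 :: x5 :: x6 :: x7 :: x8 :: x9 :: x10 :: x11 :: t := by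
  rcases l with _ | ⟨x0, l⟩
  · simp at h
  rcases l with _ | ⟨x1, l⟩
  · simp at h
  rcases l with _ | ⟨x2, l⟩
  · simp at h
  rcases l with _ | ⟨x3, l⟩
  · simp at h
  rcases l with _ | ⟨x4, l⟩
  · simp at h
  rcases l with _ | ⟨x5, l⟩
  · simp at h
  rcases l with _ | ⟨x6, l⟩
  · simp at h
  rcases l with _ | ⟨x7, l⟩
  · simp at h
  rcases l with _ | ⟨x8, l⟩
  · simp at h
  rcases l with _ | ⟨x9, l⟩
  · simp at h
  rcases l with _ | ⟨x10, l⟩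
  · simp at h
  rcases l with _ | ⟨x11, l⟩
  · simp at h
  exact ⟨x0, x1, x2, x3, x4, x5, x6, x7, x8, x9, x10, x11, l, rfl⟩

theorem pvMain (rest : List Nat) (hne : rest ≠ []) (a b c : Nat) :
    pvGo (pvTriples (pvWords (rest ++ List.replicate (pvPad rest.length) 0))) a b c
      = pvLoopA rest a b c := by
  by_cases h : rest.length > 12
  · obtain ⟨x0, x1, x2, x3, x4, x5, x6, x7, x8, x9, x10, x11, t, heq⟩ := pvExists12 rest h
    subst heq
    have ht : t ≠ [] := by
      rcases t with _ | ⟨y, t⟩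
      · simp at h
      · simp
    have h1 : 1 ≤ t.length := by
      rcases t with _ | ⟨y, t⟩
      · exact absurd rfl ht
      · simp only [List.length_cons]; omega
    have hl : (x0 :: x1 :: x2 :: x3 :: x4 :: x5 :: x6 :: x7 :: x8 :: x9 :: x10 :: x11 :: t).length = t.length + 12 := by simp
    rw [hl, pvPad_add12 _ h1]
    simp only [List.cons_append]
    rw [pvWords_twelve, pvTriples_cons3]
    obtain ⟨u, ts, he⟩ := pvTriples_ne t ht
    rw [he, pvGo_cons, ← he]
    rw [pvLoopA_step _ _ _ _ h]
    simp only []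
    rw [show pvStep (a, b, c) (pvWord4 [x0, x1, x2, x3], pvWord4 [x4, x5, x6, x7], pvWord4 [x8, x9, x10, x11])
          = pvMix ((a + pvWord4 [x0, x1, x2, x3]) % 4294967296) ((b + pvWord4 [x4, x5, x6, x7]) % 4294967296) ((c + pvWord4 [x8, x9, x10, x11]) % 4294967296) from rfl]
    rw [show (x0 :: x1 :: x2 :: x3 :: x4 :: x5 :: x6 :: x7 :: x8 :: x9 :: x10 :: x11 :: t).take 4 = [x0, x1, x2, x3] from rfl,
        show ((x0 :: x1 :: x2 :: x3 :: x4 :: x5 :: x6 :: x7 :: x8 :: x9 :: x10 :: x11 :: t).drop 4).take 4 = [x4, x5, x6, x7] from rfl,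
        show ((x0 :: x1 :: x2 :: x3 :: x4 :: x5 :: x6 :: x7 :: x8 :: x9 :: x10 :: x11 :: t).drop 8).take 4 = [x8, x9, x10, x11] from rfl,
        show (x0 :: x1 :: x2 :: x3 :: x4 :: x5 :: x6 :: x7 :: x8 :: x9 :: x10 :: x11 :: t).drop 12 = t from rfl]
    exact pvMain t ht _ _ _
  · rcases rest with _ | ⟨x0, rest⟩
    · exact absurd rfl hne
    rcases rest with _ | ⟨x1, rest⟩
    · rw [show pvPad ([x0]).length = 11 from by simp [pvPad]]
      rw [show pvGo (pvTriples (pvWords ([x0] ++ List.replicate 11 0))) a b c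
            = pvFinish ((a + pvWord4 [x0, 0, 0, 0]) % 4294967296) ((b + pvWord4 [0, 0, 0, 0]) % 4294967296) ((c + pvWord4 [0, 0, 0, 0]) % 4294967296) from rfl]
      rw [pvLoopA]
      simp [pvWord4]
      exact pvFinish_congr (by omega) (by omega) (by omega)
    rcases rest with _ | ⟨x2, rest⟩
    · rw [show pvPad ([x0, x1]).length = 10 from by simp [pvPad]]
      rw [show pvGo (pvTriples (pvWords ([x0, x1] ++ List.replicate 10 0))) a b c
            = pvFinish ((a + pvWord4 [x0, x1, 0, 0]) % 4294967296) ((b + pvWord4 [0, 0, 0, 0]) % 4294967296) ((c + pvWord4 [0, 0, 0, 0]) % 4294967296) from rfl]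
      rw [pvLoopA]
      simp [pvWord4]
      exact pvFinish_congr (by omega) (by omega) (by omega)
    rcases rest with _ | ⟨x3, rest⟩
    · rw [show pvPad ([x0, x1, x2]).length = 9 from by simp [pvPad]]
      rw [show pvGo (pvTriples (pvWords ([x0, x1, x2] ++ List.replicate 9 0))) a b c
            = pvFinish ((a + pvWord4 [x0, x1, x2, 0]) % 4294967296) ((b + pvWord4 [0, 0, 0, 0]) % 4294967296) ((c + pvWord4 [0, 0, 0, 0]) % 4294967296) from rfl]
      rw [pvLoopA]
      simp [pvWord4]
      exact pvFinish_congr (by omega) (by omega) (by omega)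
    rcases rest with _ | ⟨x4, rest⟩
    · rw [show pvPad ([x0, x1, x2, x3]).length = 8 from by simp [pvPad]]
      rw [show pvGo (pvTriples (pvWords ([x0, x1, x2, x3] ++ List.replicate 8 0))) a b c
            = pvFinish ((a + pvWord4 [x0, x1, x2, x3]) % 4294967296) ((b + pvWord4 [0, 0, 0, 0]) % 4294967296) ((c + pvWord4 [0, 0, 0, 0]) % 4294967296) from rfl]
      rw [pvLoopA]
      simp [pvWord4]
      exact pvFinish_congr (by omega) (by omega) (by omega)
    rcases rest with _ | ⟨x5, rest⟩
    · rw [show pvPad ([x0, x1, x2, x3, x4]).length = 7 from by simp [pvPad]]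
      rw [show pvGo (pvTriples (pvWords ([x0, x1, x2, x3, x4] ++ List.replicate 7 0))) a b c
            = pvFinish ((a + pvWord4 [x0, x1, x2, x3]) % 4294967296) ((b + pvWord4 [x4, 0, 0, 0]) % 4294967296) ((c + pvWord4 [0, 0, 0, 0]) % 4294967296) from rfl]
      rw [pvLoopA]
      simp [pvWord4]
      exact pvFinish_congr (by omega) (by omega) (by omega)
    rcases rest with _ | ⟨x6, rest⟩
    · rw [show pvPad ([x0, x1, x2, x3, x4, x5]).length = 6 from by simp [pvPad]]
      rw [show pvGo (pvTriples (pvWords ([x0, x1, x2, x3, x4, x5] ++ List.replicate 6 0))) a b c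
            = pvFinish ((a + pvWord4 [x0, x1, x2, x3]) % 4294967296) ((b + pvWord4 [x4, x5, 0, 0]) % 4294967296) ((c + pvWord4 [0, 0, 0, 0]) % 4294967296) from rfl]
      rw [pvLoopA]
      simp [pvWord4]
      exact pvFinish_congr (by omega) (by omega) (by omega)
    rcases rest with _ | ⟨x7, rest⟩
    · rw [show pvPad ([x0, x1, x2, x3, x4, x5, x6]).length = 5 from by simp [pvPad]]
      rw [show pvGo (pvTriples (pvWords ([x0, x1, x2, x3, x4, x5, x6] ++ List.replicate 5 0))) a b c
            = pvFinish ((a + pvWord4 [x0, x1, x2, x3]) % 4294967296) ((b + pvWord4 [x4, x5, x6, 0]) % 4294967296) ((c + pvWord4 [0, 0, 0, 0]) % 4294967296) from rfl]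
      rw [pvLoopA]
      simp [pvWord4]
      exact pvFinish_congr (by omega) (by omega) (by omega)
    rcases rest with _ | ⟨x8, rest⟩
    · rw [show pvPad ([x0, x1, x2, x3, x4, x5, x6, x7]).length = 4 from by simp [pvPad]]
      rw [show pvGo (pvTriples (pvWords ([x0, x1, x2, x3, x4, x5, x6, x7] ++ List.replicate 4 0))) a b c
            = pvFinish ((a + pvWord4 [x0, x1, x2, x3]) % 4294967296) ((b + pvWord4 [x4, x5, x6, x7]) % 4294967296) ((c + pvWord4 [0, 0, 0, 0]) % 4294967296) from rfl]
      rw [pvLoopA]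
      simp [pvWord4]
      exact pvFinish_congr (by omega) (by omega) (by omega)
    rcases rest with _ | ⟨x9, rest⟩
    · rw [show pvPad ([x0, x1, x2, x3, x4, x5, x6, x7, x8]).length = 3 from by simp [pvPad]]
      rw [show pvGo (pvTriples (pvWords ([x0, x1, x2, x3, x4, x5, x6, x7, x8] ++ List.replicate 3 0))) a b c
            = pvFinish ((a + pvWord4 [x0, x1, x2, x3]) % 4294967296) ((b + pvWord4 [x4, x5, x6, x7]) % 4294967296) ((c + pvWord4 [x8, 0, 0, 0]) % 4294967296) from rfl]
      rw [pvLoopA]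
      simp [pvWord4]
      exact pvFinish_congr (by omega) (by omega) (by omega)
    rcases rest with _ | ⟨x10, rest⟩
    · rw [show pvPad ([x0, x1, x2, x3, x4, x5, x6, x7, x8, x9]).length = 2 from by simp [pvPad]]
      rw [show pvGo (pvTriples (pvWords ([x0, x1, x2, x3, x4, x5, x6, x7, x8, x9] ++ List.replicate 2 0))) a b c
            = pvFinish ((a + pvWord4 [x0, x1, x2, x3]) % 4294967296) ((b + pvWord4 [x4, x5, x6, x7]) % 4294967296) ((c + pvWord4 [x8, x9, 0, 0]) % 4294967296) from rfl]
      rw [pvLoopA]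
      simp [pvWord4]
      exact pvFinish_congr (by omega) (by omega) (by omega)
    rcases rest with _ | ⟨x11, rest⟩
    · rw [show pvPad ([x0, x1, x2, x3, x4, x5, x6, x7, x8, x9, x10]).length = 1 from by simp [pvPad]]
      rw [show pvGo (pvTriples (pvWords ([x0, x1, x2, x3, x4, x5, x6, x7, x8, x9, x10] ++ List.replicate 1 0))) a b c
            = pvFinish ((a + pvWord4 [x0, x1, x2, x3]) % 4294967296) ((b + pvWord4 [x4, x5, x6, x7]) % 4294967296) ((c + pvWord4 [x8, x9, x10, 0]) % 4294967296) from rfl]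
      rw [pvLoopA]
      simp [pvWord4]
      exact pvFinish_congr (by omega) (by omega) (by omega)
    rcases rest with _ | ⟨x12, rest⟩
    · rw [show pvPad ([x0, x1, x2, x3, x4, x5, x6, x7, x8, x9, x10, x11]).length = 0 from by simp [pvPad]]
      rw [show pvGo (pvTriples (pvWords ([x0, x1, x2, x3, x4, x5, x6, x7, x8, x9, x10, x11] ++ List.replicate 0 0))) a b c
            = pvFinish ((a + pvWord4 [x0, x1, x2, x3]) % 4294967296) ((b + pvWord4 [x4, x5, x6, x7]) % 4294967296) ((c + pvWord4 [x8, x9, x10, x11]) % 4294967296) from rfl]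
      rw [pvLoopA]
      simp [pvWord4]
      exact pvFinish_congr (by omega) (by omega) (by omega)
    · simp at h
termination_by rest.length
decreasing_by rw [heq]; simp only [List.length_cons]; omega

-- ===== VERDICT (by name: the statement is the Claim_ definition above) =====
theorem hashlittle2_spec : Claim_equal_hashlittle2 := by
  intro data initval initval2 _
  unfold Spec_hashlittle2 hashlittle2 hashlittle2_alt
  by_cases h : (pvBytes data).length = 0
  · rw [List.length_eq_zero_iff] at h
    rw [h]
    simp [pvLoopA]
  · simp only [if_neg h]
    rw [pvMain _ (by intro he; rw [he] at h; exact h rfl)]
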